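-- pv_equiv track=rewrite | github.com/J1-MI/V2R | src/pipeline/scanner_pipeline.py | _determine_max_severity
-- ===== SOURCE A (Python) =====
-- from typing import Dict, Any, Optional, List
--
-- def _determine_max_severity(normalized_result: Dict[str, Any]) -> str:
--     """정규화된 결과에서 최고 심각도 결정"""
--     findings = normalized_result.get("findings", [])
--     if not findings:
--         return "Info"
--
--     severities = [f.get("severity", "Info") for f in findings]
--     severity_order = ["Critical", "High", "Medium", "Low", "Info"]
--
--     # 최고 심각도 찾기
--     max_severity = "Info"
--     min_index = 999
--     for severity in severities:
--         if severity in severity_order: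
--             idx = severity_order.index(severity)
--             if idx < min_index:
--                 min_index = idx
--                 max_severity = severity
--
--     return max_severity
-- ===== SOURCE B (Python) =====
-- def _determine_max_severity(normalized_result):
--     """정규화된 결과에서 최고 심각도 결정"""
--     findings = normalized_result.get("findings", [])
--     present = {f.get("severity", "Info") for f in findings}
--     for sev in ["Critical", "High", "Medium", "Low", "Info"]:
--         if sev in present:
--             return sev
--     return "Info"
-- ===== Notes on version B (the rewrite author's own statement) =====
-- stated objective: simpler
-- what changed: Instead of scanning the findings while tracking a minimum index into the priority list, B builds the set of severities once and walks the fixed priority order Critical..Info returning the first one present (falling back to Info).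
import Mathlib
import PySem

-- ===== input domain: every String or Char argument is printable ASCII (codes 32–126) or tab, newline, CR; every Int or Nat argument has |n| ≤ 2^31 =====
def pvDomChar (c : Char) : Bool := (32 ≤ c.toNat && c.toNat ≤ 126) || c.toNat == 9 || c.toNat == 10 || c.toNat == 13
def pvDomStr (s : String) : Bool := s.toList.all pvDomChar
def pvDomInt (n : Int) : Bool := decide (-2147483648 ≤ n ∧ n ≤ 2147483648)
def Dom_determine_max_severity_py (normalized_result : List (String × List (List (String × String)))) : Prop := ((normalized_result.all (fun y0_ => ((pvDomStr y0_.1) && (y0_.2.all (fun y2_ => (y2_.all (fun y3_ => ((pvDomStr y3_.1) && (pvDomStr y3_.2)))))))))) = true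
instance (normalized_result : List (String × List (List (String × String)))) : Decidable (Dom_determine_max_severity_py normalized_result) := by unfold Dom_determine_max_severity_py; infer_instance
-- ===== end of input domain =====

-- B differs from A: B collects the set of severities once and returns the first entry of the
-- fixed priority order present in it, instead of scanning findings tracking a minimum index.

-- ===== PORT A =====
-- step of A's `for severity in severities:` loop, state = (max_severity, min_index)
def pvStepA (st : String × Int) (sev : String) : String × Int :=
  if sev ∈ ["Critical", "High", "Medium", "Low", "Info"] then
    match PySem.List.index? ["Critical", "High", "Medium", "Low", "Info"] sev with
    | some idx => if (idx : Int) < st.2 then (sev, (idx : Int)) else st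
    | none => st
  else st

def determine_max_severity_py (normalized_result : List (String × List (List (String × String)))) : String :=
  let findings := PySem.Dict.getD (PySem.Dict.mk normalized_result) "findings" []
  if findings = [] then "Info"
  else
    let severities := findings.map (fun f => PySem.Dict.getD (PySem.Dict.mk f) "severity" "Info")
    (severities.foldl pvStepA ("Info", 999)).1

-- ===== PORT B =====
def determine_max_severity_py_alt (normalized_result : List (String × List (List (String × String)))) : String :=
  let findings := PySem.Dict.getD (PySem.Dict.mk normalized_result) "findings" []
  let present : PySem.Set String :=
    PySem.Set.ofList (findings.map (fun f => PySem.Dict.getD (PySem.Dict.mk f) "severity" "Info"))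
  -- the `for sev in [...]: if sev in present: return sev` loop over the literal priority list
  match (["Critical", "High", "Medium", "Low", "Info"]).find? (fun s => PySem.Set.contains present s) with
  | some s => s
  | none => "Info"

-- ===== PRECONDITION & SPEC =====
def Spec_determine_max_severity_py (normalized_result : List (String × List (List (String × String)))) (out : String) : Prop := out = determine_max_severity_py_alt normalized_result
instance (normalized_result : List (String × List (List (String × String)))) (out : String) : Decidable (Spec_determine_max_severity_py normalized_result out) := by unfold Spec_determine_max_severity_py; infer_instance

-- ===== CLAIM (what is proved, stated in full; the proofs are below) =====
def Claim_equal_determine_max_severity_py : Prop := ∀ (normalized_result : List (String × List (List (String × String)))), Dom_determine_max_severity_py normalized_result → Spec_determine_max_severity_py normalized_result (determine_max_severity_py normalized_result)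

-- ===== LEMMAS AND PROOFS =====

-- name of the severity with priority index k (any other k, incl. the sentinel 999, names "Info")
def pvSevName (k : Int) : String :=
  if k = 0 then "Critical" else if k = 1 then "High" else if k = 2 then "Medium"
  else if k = 3 then "Low" else "Info"

-- priority index of a severity string (999 if unknown)
def pvIdxVal (s : String) : Int :=
  if s = "Critical" then 0 else if s = "High" then 1 else if s = "Medium" then 2
  else if s = "Low" then 3 else if s = "Info" then 4 else 999

-- least priority index present in the list (999 if none)
def pvM (sevs : List String) : Int :=
  if "Critical" ∈ sevs then 0 else if "High" ∈ sevs then 1 else if "Medium" ∈ sevs then 2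
  else if "Low" ∈ sevs then 3 else if "Info" ∈ sevs then 4 else 999

lemma pvM_le (sevs : List String) : pvM sevs ≤ 999 := by
  unfold pvM; split_ifs <;> omega

lemma pvM_cons (s : String) (t : List String) : pvM (s :: t) = min (pvIdxVal s) (pvM t) := by
  by_cases h1 : s = "Critical"
  · subst h1; simp [pvM, pvIdxVal]; split_ifs <;> omega
  · by_cases h2 : s = "High"
    · subst h2; simp [pvM, pvIdxVal]; split_ifs <;> omega
    · by_cases h3 : s = "Medium"
      · subst h3; simp [pvM, pvIdxVal]; split_ifs <;> omega
      · by_cases h4 : s = "Low"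
        · subst h4; simp [pvM, pvIdxVal]; split_ifs <;> omega
        · by_cases h5 : s = "Info"
          · subst h5; simp [pvM, pvIdxVal]; split_ifs <;> omega
          · simp [pvM, pvIdxVal, List.mem_cons, h1, h2, h3, h4, h5,
              Ne.symm h1, Ne.symm h2, Ne.symm h3, Ne.symm h4, Ne.symm h5]
            split_ifs <;> omega

lemma stepA_char (s : String) (k : Int) (hk : k ≤ 999) :
    pvStepA (pvSevName k, k) s = (pvSevName (min k (pvIdxVal s)), min k (pvIdxVal s)) := by
  by_cases h1 : s = "Critical"
  · subst h1
    have hidx : PySem.List.index? ["Critical", "High", "Medium", "Low", "Info"] "Critical" = some 0 := by decide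
    simp only [pvStepA, hidx]
    by_cases hc : (0:Int) < k
    · have h0 : min k 0 = 0 := by omega
      simp [hc, h0, pvSevName, pvIdxVal]
    · have h0 : min k 0 = k := by omega
      simp [hc, h0, pvIdxVal]
  · by_cases h2 : s = "High"
    · subst h2
      have hidx : PySem.List.index? ["Critical", "High", "Medium", "Low", "Info"] "High" = some 1 := by decide
      simp only [pvStepA, hidx]
      by_cases hc : (1:Int) < k
      · have h0 : min k 1 = 1 := by omega
        simp [hc, h0, pvSevName, pvIdxVal]
      · have h0 : min k 1 = k := by omega
        simp [hc, h0, pvIdxVal]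
    · by_cases h3 : s = "Medium"
      · subst h3
        have hidx : PySem.List.index? ["Critical", "High", "Medium", "Low", "Info"] "Medium" = some 2 := by decide
        simp only [pvStepA, hidx]
        by_cases hc : (2:Int) < k
        · have h0 : min k 2 = 2 := by omega
          simp [hc, h0, pvSevName, pvIdxVal]
        · have h0 : min k 2 = k := by omega
          simp [hc, h0, pvIdxVal]
      · by_cases h4 : s = "Low"
        · subst h4
          have hidx : PySem.List.index? ["Critical", "High", "Medium", "Low", "Info"] "Low" = some 3 := by decide
          simp only [pvStepA, hidx]
          by_cases hc : (3:Int) < k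
          · have h0 : min k 3 = 3 := by omega
            simp [hc, h0, pvSevName, pvIdxVal]
          · have h0 : min k 3 = k := by omega
            simp [hc, h0, pvIdxVal]
        · by_cases h5 : s = "Info"
          · subst h5
            have hidx : PySem.List.index? ["Critical", "High", "Medium", "Low", "Info"] "Info" = some 4 := by decide
            simp only [pvStepA, hidx]
            by_cases hc : (4:Int) < k
            · have h0 : min k 4 = 4 := by omega
              simp [hc, h0, pvSevName, pvIdxVal]
            · have h0 : min k 4 = k := by omega
              simp [hc, h0, pvIdxVal]
          · have h0 : min k 999 = k := by omega
            simp [pvStepA, pvIdxVal, List.mem_cons, h1, h2, h3, h4, h5, h0]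

lemma foldA_char (sevs : List String) (k : Int) (hk : k ≤ 999) :
    sevs.foldl pvStepA (pvSevName k, k) = (pvSevName (min k (pvM sevs)), min k (pvM sevs)) := by
  induction sevs generalizing k with
  | nil =>
      have hM : pvM [] = 999 := by simp [pvM]
      have : min k (pvM []) = k := by rw [hM]; omega
      simp [this]
  | cons s t ih =>
      have hmin : min k (pvIdxVal s) ≤ 999 := by omega
      calc ((s :: t).foldl pvStepA (pvSevName k, k))
          = t.foldl pvStepA (pvStepA (pvSevName k, k) s) := rfl
        _ = t.foldl pvStepA (pvSevName (min k (pvIdxVal s)), min k (pvIdxVal s)) := by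
              rw [stepA_char s k hk]
        _ = (pvSevName (min (min k (pvIdxVal s)) (pvM t)), min (min k (pvIdxVal s)) (pvM t)) :=
              ih _ hmin
        _ = (pvSevName (min k (pvM (s :: t))), min k (pvM (s :: t))) := by
              rw [pvM_cons, ← min_assoc]

lemma b_find_eq (sevs : List String) :
    (match (["Critical", "High", "Medium", "Low", "Info"]).find?
        (fun s => PySem.Set.contains (PySem.Set.ofList sevs) s) with
     | some s => s
     | none => "Info")
      = pvSevName (pvM sevs) := by
  by_cases h1 : "Critical" ∈ sevs <;> by_cases h2 : "High" ∈ sevs <;>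
    by_cases h3 : "Medium" ∈ sevs <;> by_cases h4 : "Low" ∈ sevs <;> by_cases h5 : "Info" ∈ sevs <;>
    simp [List.find?, PySem.Set.contains, PySem.Set.mem_ofList, pvM, pvSevName, h1, h2, h3, h4, h5]

-- ===== VERDICT (by name: the statement is the Claim_ definition above) =====
theorem determine_max_severity_py_spec : Claim_equal_determine_max_severity_py := by
  intro nr _
  unfold Spec_determine_max_severity_py determine_max_severity_py determine_max_severity_py_alt
  set findings := PySem.Dict.getD (PySem.Dict.mk nr) "findings" [] with hf
  by_cases h : findings = []
  · simp [h, PySem.Set.ofList]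
  · simp only [h]
    set sevs := findings.map (fun f => PySem.Dict.getD (PySem.Dict.mk f) "severity" "Info")
    have h999 : (("Info", (999 : Int)) : String × Int) = (pvSevName 999, 999) := by
      simp [pvSevName]
    rw [h999, foldA_char sevs 999 (by omega), b_find_eq]
    have : min (999 : Int) (pvM sevs) = pvM sevs := by have := pvM_le sevs; omega
    rw [this]
    simp
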